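-- pv_equiv track=rewrite | github.com/Trummler12/Schoolsystem2 | backend/src/main/resources/scripts/YouTube_Data/video_query_helpers/prep.py | reorder_channels
-- ===== SOURCE A (Python) =====
-- from typing import Callable, Iterable
--
-- def normalize_handle(value: str) -> str:
--     raw = (value or "").strip()
--     if not raw:
--         return ""
--     if raw.startswith("http"):
--         parts = [p for p in raw.split("/") if p]
--         for part in parts:
--             if part.startswith("@"):
--                 raw = part
--                 break
--     raw = raw.strip()
--     if raw.startswith("@"):
--         raw = raw[1:]
--     return raw.strip()
--
-- def normalize_identifier(value: str) -> str:
--     return normalize_handle(value).lower()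
--
-- def _ordered_rows(
--     rows: list[dict],
--     key_fn: Callable[[dict], str],
--     ref_index: dict[str, int],
--     extra_sort: Callable[[dict], tuple] | None = None,
-- ) -> tuple[list[dict], int, bool]:
--     kept = []
--     removed = 0
--     for row in rows:
--         key = key_fn(row)
--         if key and key in ref_index:
--             kept.append((ref_index[key], row))
--         else:
--             removed += 1
--
--     def sort_key(item: tuple[int, dict]) -> tuple:
--         order, row = item
--         if extra_sort:
--             return (order,) + extra_sort(row)
--         return (order,)
--
--     ordered = sorted(kept, key=sort_key)
--     reordered_rows = [row for _, row in ordered]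
--     reordered = [row.get("video_id", "") or row.get("playlist_id", "") or row.get("channel_id", "") for row in rows if row] != [
--         row.get("video_id", "") or row.get("playlist_id", "") or row.get("channel_id", "") for row in reordered_rows
--     ]
--     return reordered_rows, removed, reordered
--
-- def reorder_channels(channels_rows: list[dict], channel_ref_index: dict[str, int]) -> tuple[list[dict], int, bool]:
--     def key_fn(row: dict) -> str:
--         for key in ("channel_id", "custom_url", "title"):
--             value = normalize_identifier(row.get(key, ""))
--             if value and value in channel_ref_index:
--                 return value
--         return ""
--
--     return _ordered_rows(channels_rows, key_fn, channel_ref_index)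
-- ===== SOURCE B (Python) =====
-- def normalize_handle(value: str) -> str:
--     raw = (value or "").strip()
--     if not raw:
--         return ""
--     if raw.startswith("http"):
--         parts = [p for p in raw.split("/") if p]
--         for part in parts:
--             if part.startswith("@"):
--                 raw = part
--                 break
--     raw = raw.strip()
--     if raw.startswith("@"):
--         raw = raw[1:]
--     return raw.strip()
--
-- def normalize_identifier(value: str) -> str:
--     return normalize_handle(value).lower()
--
-- def _first_id(row: dict) -> str:
--     for k in ("video_id", "playlist_id", "channel_id"):
--         v = row.get(k, "")
--         if v:
--             return v
--     return ""
--
-- def reorder_channels(channels_rows: list[dict], channel_ref_index: dict[str, int]) -> tuple[list[dict], int, bool]: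
--     # No sort of (order, row) pairs and no buckets: map each row to its order value
--     # (or None), then emit, for each distinct order value in ascending order, the
--     # original rows carrying that value.
--     def order_of(row: dict):
--         for field in ("channel_id", "custom_url", "title"):
--             v = normalize_identifier(row.get(field, ""))
--             if v and v in channel_ref_index:
--                 return channel_ref_index[v]
--         return None
--     orders = [order_of(r) for r in channels_rows]
--     removed = orders.count(None)
--     reordered_rows = [r for o in sorted({o for o in orders if o is not None})
--                       for r in channels_rows if order_of(r) == o]
--     reordered = [_first_id(r) for r in channels_rows if r] != [_first_id(r) for r in reordered_rows]
--     return reordered_rows, removed, reordered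
-- ===== Notes on version B (the rewrite author's own statement) =====
-- stated objective: alternative
-- what changed: Instead of building (order,row) pairs and stable-sorting them, B maps each row to an Optional order value, counts the Nones as removed, and builds the result by iterating the sorted set of distinct order values and filtering the original rows per value.
import Mathlib
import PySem

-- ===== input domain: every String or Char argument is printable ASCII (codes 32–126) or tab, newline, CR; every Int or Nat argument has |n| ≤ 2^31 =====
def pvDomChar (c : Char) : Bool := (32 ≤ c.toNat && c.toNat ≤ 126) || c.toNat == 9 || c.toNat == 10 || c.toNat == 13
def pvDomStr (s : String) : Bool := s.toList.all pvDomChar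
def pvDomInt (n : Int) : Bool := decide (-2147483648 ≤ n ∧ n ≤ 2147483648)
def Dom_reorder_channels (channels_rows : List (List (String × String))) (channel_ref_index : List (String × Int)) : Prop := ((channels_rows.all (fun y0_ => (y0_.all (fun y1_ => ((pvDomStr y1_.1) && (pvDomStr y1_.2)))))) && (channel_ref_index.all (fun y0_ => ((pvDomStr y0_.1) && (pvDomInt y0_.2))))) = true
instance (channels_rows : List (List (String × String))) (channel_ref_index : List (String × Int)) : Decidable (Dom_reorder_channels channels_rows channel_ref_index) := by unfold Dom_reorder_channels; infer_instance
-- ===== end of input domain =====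

-- B replaces A's stable sort of built (order, row) pairs by mapping each row to an
-- optional order value and emitting, per distinct order value in ascending order, the
-- matching original rows (objective: alternative; same return value).

-- ===== PORT A =====
-- shared helpers (module-level helpers of the Python file, used by both ports)
-- row.get(k, "") on a dict row
def pvRowGet (row : List (String × String)) (k : String) : String :=
  (PySem.Dict.mk row).getD k ""

-- normalize_handle (the for/break over '/'-parts is the first '@'-part, i.e. find?)
def pvNormHandle (value : String) : String :=
  let raw := PySem.Str.strip value
  if raw == "" then ""
  else
    let raw := if PySem.Str.startswith raw "http" then
        match (((PySem.Str.split? raw "/").getD []).filter (fun p => !(p == ""))).find?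
            (fun p => PySem.Str.startswith p "@") with
        | some part => part
        | none => raw
      else raw
    let raw := PySem.Str.strip raw
    let raw := if PySem.Str.startswith raw "@" then PySem.Str.slice raw (some 1) none else raw
    PySem.Str.strip raw

-- normalize_identifier
def pvNormIdent (value : String) : String := PySem.Str.lower (pvNormHandle value)

-- A's key_fn: the 3-element for-loop over ("channel_id", "custom_url", "title"), unrolled
def pvChanKey (refd : PySem.Dict String Int) (row : List (String × String)) : String :=
  let v1 := pvNormIdent (pvRowGet row "channel_id")
  if v1 != "" && refd.contains v1 then v1 else
  let v2 := pvNormIdent (pvRowGet row "custom_url")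
  if v2 != "" && refd.contains v2 then v2 else
  let v3 := pvNormIdent (pvRowGet row "title")
  if v3 != "" && refd.contains v3 then v3 else ""

-- row.get("video_id","") or row.get("playlist_id","") or row.get("channel_id","")
def pvRowIdent (row : List (String × String)) : String :=
  let v := pvRowGet row "video_id"
  if v != "" then v else
  let p := pvRowGet row "playlist_id"
  if p != "" then p else pvRowGet row "channel_id"

def reorder_channels (channels_rows : List (List (String × String))) (channel_ref_index : List (String × Int)) : (List (List (String × String))) × Int × Bool :=
  let refd := PySem.Dict.mk channel_ref_index
  -- _ordered_rows: kept/removed loop (ref_index[key] is guarded by 'key in ref_index')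
  let kr := channels_rows.foldl
    (fun (s : List (Int × List (String × String)) × Int) row =>
      let key := pvChanKey refd row
      if key != "" && refd.contains key then (s.1 ++ [(refd.getD key 0, row)], s.2)
      else (s.1, s.2 + 1))
    ([], 0)
  -- ordered = sorted(kept, key=sort_key) with extra_sort = None, i.e. key (order,)
  let ordered := PySem.List.sorted kr.1 (fun item => item.1) false
  let reordered_rows := ordered.map (fun x => x.2)
  let reordered := ((channels_rows.filter (fun r => !r.isEmpty)).map pvRowIdent)
      != (reordered_rows.map pvRowIdent)
  (reordered_rows, kr.2, reordered)

-- ===== PORT B =====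
-- B's order_of: iterate the field names, return ref[v] for the first admissible value
def pvOrderOf (refd : PySem.Dict String Int) (row : List (String × String)) : Option Int :=
  ["channel_id", "custom_url", "title"].findSome? (fun field =>
    let v := pvNormIdent (pvRowGet row field)
    if v != "" && refd.contains v then refd.get? v else none)

-- B's _first_id: first truthy of the three id fields
def pvFirstId (row : List (String × String)) : String :=
  (["video_id", "playlist_id", "channel_id"].findSome? (fun k =>
    let v := pvRowGet row k
    if v != "" then some v else none)).getD ""

def reorder_channels_alt (channels_rows : List (List (String × String))) (channel_ref_index : List (String × Int)) : (List (List (String × String))) × Int × Bool :=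
  let refd := PySem.Dict.mk channel_ref_index
  let orders := channels_rows.map (pvOrderOf refd)
  let removed : Int := (PySem.List.count orders none : Int)
  -- sorted({o for o in orders if o is not None})
  let sortedOrders := PySem.List.sorted (PySem.Set.ofList (orders.filterMap id)) (fun o => o) false
  -- [r for o in sortedOrders for r in channels_rows if order_of(r) == o]
  let reordered_rows := sortedOrders.flatMap
    (fun o => channels_rows.filter (fun r => pvOrderOf refd r == some o))
  let reordered := ((channels_rows.filter (fun r => !r.isEmpty)).map pvFirstId)
      != (reordered_rows.map pvFirstId)
  (reordered_rows, removed, reordered)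

-- ===== PRECONDITION & SPEC =====
def Spec_reorder_channels (channels_rows : List (List (String × String))) (channel_ref_index : List (String × Int)) (out : (List (List (String × String))) × Int × Bool) : Prop := out = reorder_channels_alt channels_rows channel_ref_index
instance (channels_rows : List (List (String × String))) (channel_ref_index : List (String × Int)) (out : (List (List (String × String))) × Int × Bool) : Decidable (Spec_reorder_channels channels_rows channel_ref_index out) := by unfold Spec_reorder_channels; infer_instance

-- ===== CLAIM (what is proved, stated in full; the proofs are below) =====
def Claim_equal_reorder_channels : Prop := ∀ (channels_rows : List (List (String × String))) (channel_ref_index : List (String × Int)), Dom_reorder_channels channels_rows channel_ref_index → Spec_reorder_channels channels_rows channel_ref_index (reorder_channels channels_rows channel_ref_index)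

-- ===== LEMMAS AND PROOFS =====

-- the kept-row predicate and order of a row (A's view)
def pvPred (refd : PySem.Dict String Int) (row : List (String × String)) : Bool :=
  pvChanKey refd row != "" && refd.contains (pvChanKey refd row)

def pvOrd (refd : PySem.Dict String Int) (row : List (String × String)) : Int :=
  refd.getD (pvChanKey refd row) 0

def pvKept (refd : PySem.Dict String Int) (rows : List (List (String × String))) :
    List (Int × List (String × String)) :=
  (rows.filter (pvPred refd)).map (fun row => (pvOrd refd row, row))

-- concatenation of the key-o groups of l, for o running over S
def pvH {α : Type} (S : List Int) (l : List (Int × α)) : List (Int × α) :=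
  S.flatMap (fun o => l.filter (fun q => q.1 == o))

lemma pvChanKey_contains (refd : PySem.Dict String Int) (row : List (String × String))
    (h : pvChanKey refd row ≠ "") : refd.contains (pvChanKey refd row) = true := by
  unfold pvChanKey at h ⊢
  dsimp only at h ⊢
  split_ifs at h ⊢ with h1 h2 h3 <;> simp_all [Bool.and_eq_true]

lemma pvPred_eq (refd : PySem.Dict String Int) (row : List (String × String)) :
    pvPred refd row = (pvChanKey refd row != "") := by
  by_cases h : pvChanKey refd row = ""
  · simp [pvPred, h]
  · simp [pvPred, pvChanKey_contains refd row h]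

lemma pvGet?_of_contains (refd : PySem.Dict String Int) (k : String)
    (h : refd.contains k = true) : refd.get? k = some (refd.getD k 0) := by
  rw [PySem.Dict.getD_eq_get?_getD]
  cases hg : refd.get? k with
  | none => rw [PySem.Dict.get?_eq_none_iff_contains] at hg; simp [hg] at h
  | some x => rfl

-- B's order_of in terms of A's key_fn
lemma pvOrderOf_eq (refd : PySem.Dict String Int) (row : List (String × String)) :
    pvOrderOf refd row
      = if pvPred refd row then some (pvOrd refd row) else none := by
  rw [pvPred_eq]
  unfold pvOrderOf pvChanKey pvOrd pvChanKey
  simp only [List.findSome?]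
  split_ifs with h1 h2 h3 <;>
    simp_all [pvGet?_of_contains, Bool.and_eq_true]

-- B's _first_id equals A's or-chain
lemma pvFirstId_eq : pvFirstId = pvRowIdent := by
  funext row
  unfold pvFirstId pvRowIdent
  simp only [List.findSome?]
  split_ifs <;> simp_all

lemma pvInsertBy_front {α : Type} (before : α → α → Bool) (x : α) (L : List α)
    (h : ∀ y ∈ L, before x y = true) :
    PySem.List.insertBy before x L = x :: L := by
  cases L with
  | nil => rfl
  | cons y ys => simp [PySem.List.insertBy, h y (by simp)]

lemma pvInsertBy_append_left {α : Type} (before : α → α → Bool) (x : α) (A B : List α)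
    (h : ∀ y ∈ A, before x y = false) :
    PySem.List.insertBy before x (A ++ B) = A ++ PySem.List.insertBy before x B := by
  induction A with
  | nil => rfl
  | cons a as ih =>
      simp only [List.cons_append, PySem.List.insertBy, h a (by simp)]
      simp only [Bool.false_eq_true, if_false]
      rw [ih (fun y hy => h y (by simp [hy]))]

lemma pvH_key_mem {α : Type} (S : List Int) (l : List (Int × α)) (x : Int × α)
    (hx : x ∈ pvH S l) : x.1 ∈ S := by
  simp only [pvH, List.mem_flatMap, List.mem_filter] at hx
  obtain ⟨o, ho, -, he⟩ := hx
  rw [beq_iff_eq] at he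
  exact he ▸ ho

lemma pvH_append_not_mem {α : Type} (S : List Int) (l : List (Int × α)) (p : Int × α)
    (h : p.1 ∉ S) : pvH S (l ++ [p]) = pvH S l := by
  induction S with
  | nil => rfl
  | cons o S' ih =>
      simp only [List.mem_cons, not_or] at h
      simp only [pvH, List.flatMap_cons] at ih ⊢
      rw [ih h.2, List.filter_append]
      have hbe : (p.1 == o) = false := beq_eq_false_iff_ne.mpr h.1
      simp [List.filter, hbe]

lemma pvInsert_H_mem {α : Type} (S : List Int) (l : List (Int × α)) (p : Int × α)
    (hS : S.Pairwise (· < ·)) (hp : p.1 ∈ S) :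
    PySem.List.insertBy (fun a b => decide (a.1 < b.1)) p (pvH S l) = pvH S (l ++ [p]) := by
  induction S with
  | nil => simp at hp
  | cons o S' ih =>
      have hpw := (List.pairwise_cons.mp hS).1
      have hS' := (List.pairwise_cons.mp hS).2
      simp only [pvH, List.flatMap_cons] at ih ⊢
      rcases List.mem_cons.mp hp with heq | hmem
      · -- p.1 = o : insert right after the o-block
        have hnotS' : p.1 ∉ S' := fun hx => absurd (heq ▸ hpw _ hx) (lt_irrefl o)
        rw [pvInsertBy_append_left _ _ _ _
            (fun y hy => by
              have : y.1 = o := by simpa [beq_iff_eq] using (List.mem_filter.mp hy).2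
              simp [this, heq])]
        rw [pvInsertBy_front _ _ _
            (fun y hy => by
              have : y.1 ∈ S' := pvH_key_mem S' l y hy
              simp only [decide_eq_true_eq, heq]
              exact hpw _ this)]
        have h1 : List.filter (fun q => q.1 == o) (l ++ [p]) =
            List.filter (fun q => q.1 == o) l ++ [p] := by
          simp [List.filter_append, List.filter, heq]
        have h2 : pvH S' (l ++ [p]) = pvH S' l := pvH_append_not_mem S' l p hnotS'
        simp only [pvH] at h2
        rw [h1, h2]
        simp
      · -- o < p.1 : skip the o-block, recurse
        have hlt : o < p.1 := hpw _ hmem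
        rw [pvInsertBy_append_left _ _ _ _
            (fun y hy => by
              have : y.1 = o := by simpa [beq_iff_eq] using (List.mem_filter.mp hy).2
              simp [this]; omega)]
        rw [ih hS' hmem]
        have hbe : (p.1 == o) = false := beq_eq_false_iff_ne.mpr (by omega)
        have : List.filter (fun q => q.1 == o) (l ++ [p]) = List.filter (fun q => q.1 == o) l := by
          simp [List.filter_append, List.filter, hbe]
        rw [this]

lemma pvInsert_H_not_mem {α : Type} (S : List Int) (l : List (Int × α)) (p : Int × α)
    (hS : S.Pairwise (· < ·)) (hp : p.1 ∉ S)
    (hf : l.filter (fun q => q.1 == p.1) = []) :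
    PySem.List.insertBy (fun a b => decide (a.1 < b.1)) p (pvH S l)
      = pvH (PySem.List.insertBy (fun a b => decide (a < b)) p.1 S) (l ++ [p]) := by
  induction S with
  | nil =>
      simp only [pvH, PySem.List.insertBy, List.flatMap_cons, List.flatMap_nil,
        List.filter_append, hf]
      simp [List.filter]
  | cons o S' ih =>
      have hpw := (List.pairwise_cons.mp hS).1
      have hS' := (List.pairwise_cons.mp hS).2
      simp only [List.mem_cons, not_or] at hp
      rcases lt_trichotomy p.1 o with hlt | heq | hgt
      · -- p goes in front of everything
        have hins : PySem.List.insertBy (fun a b => decide (a < b)) p.1 (o :: S') =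
            p.1 :: o :: S' := by simp [PySem.List.insertBy, hlt]
        rw [hins, pvInsertBy_front _ _ _
            (fun y hy => by
              have hm : y.1 ∈ o :: S' := pvH_key_mem _ l y hy
              simp only [decide_eq_true_eq]
              rcases List.mem_cons.mp hm with h | h
              · omega
              · have := hpw _ h; omega)]
        have h2 : pvH (o :: S') (l ++ [p]) = pvH (o :: S') l :=
          pvH_append_not_mem _ l p (by simp [hp.1, hp.2])
        simp only [pvH, List.flatMap_cons] at h2 ⊢
        rw [h2, List.filter_append, hf]
        simp [List.filter]
      · exact absurd heq hp.1
      · -- skip the o-block, recurse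
        have hins : PySem.List.insertBy (fun a b => decide (a < b)) p.1 (o :: S') =
            o :: PySem.List.insertBy (fun a b => decide (a < b)) p.1 S' := by
          simp [PySem.List.insertBy]; omega
        rw [hins]
        simp only [pvH, List.flatMap_cons] at ih ⊢
        rw [pvInsertBy_append_left _ _ _ _
            (fun y hy => by
              have : y.1 = o := by simpa [beq_iff_eq] using (List.mem_filter.mp hy).2
              simp [this]; omega)]
        rw [ih hS' hp.2]
        have hbe : (p.1 == o) = false := beq_eq_false_iff_ne.mpr (by omega)
        have : List.filter (fun q => q.1 == o) (l ++ [p]) = List.filter (fun q => q.1 == o) l := by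
          simp [List.filter_append, List.filter, hbe]
        rw [this]

-- A stable sort on the first component is the concatenation of the key groups,
-- keys in ascending order, rows inside a group in original order.
theorem pvSort {α : Type} (ys : List (Int × α)) :
    PySem.List.sorted ys (fun q => q.1) false
      = pvH (PySem.List.sorted (PySem.Set.ofList (ys.map Prod.fst)) (fun o => o) false) ys := by
  induction ys using List.reverseRecOn with
  | nil => rfl
  | append_singleton ys p ih =>
      have hL : PySem.List.sorted (ys ++ [p]) (fun q => q.1) false
          = PySem.List.insertBy (fun a b => decide (a.1 < b.1)) p
              (PySem.List.sorted ys (fun q => q.1) false) := by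
        rw [PySem.List.sorted_eq_foldl_insertBy, PySem.List.sorted_eq_foldl_insertBy,
          List.foldl_append]
        rfl
      have hset : PySem.Set.ofList ((ys ++ [p]).map Prod.fst)
          = (PySem.Set.ofList (ys.map Prod.fst)).add p.1 := by
        rw [List.map_append]; exact PySem.Set.ofList_append_singleton _ _
      have hpw : (PySem.List.sorted (PySem.Set.ofList (ys.map Prod.fst)) (fun o => o) false).Pairwise (· < ·) :=
        PySem.List.sorted_ofList_pairwise_lt _
      by_cases hmem : p.1 ∈ PySem.Set.ofList (ys.map Prod.fst)
      · rw [hL, ih, hset, PySem.Set.add_of_mem hmem]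
        exact pvInsert_H_mem _ ys p hpw
          ((PySem.List.mem_sorted _ _ _ _).mpr hmem)
      · rw [hL, ih, hset, PySem.Set.add_of_not_mem hmem]
        have hsorted : PySem.List.sorted ((PySem.Set.ofList (ys.map Prod.fst)) ++ [p.1]) (fun o => o) false
            = PySem.List.insertBy (fun a b => decide (a < b)) p.1
                (PySem.List.sorted (PySem.Set.ofList (ys.map Prod.fst)) (fun o => o) false) := by
          rw [PySem.List.sorted_eq_foldl_insertBy, PySem.List.sorted_eq_foldl_insertBy,
            List.foldl_append]
          rfl
        rw [hsorted]
        have hnot : p.1 ∉ PySem.List.sorted (PySem.Set.ofList (ys.map Prod.fst)) (fun o => o) false := by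
          rw [PySem.List.mem_sorted]; exact hmem
        have hf : ys.filter (fun q => q.1 == p.1) = [] := by
          rw [List.filter_eq_nil_iff]
          intro q hq
          have : q.1 ∈ ys.map Prod.fst := List.mem_map_of_mem hq
          have hne : q.1 ≠ p.1 := by
            intro he
            exact hmem ((PySem.Set.mem_ofList _ _).mpr (he ▸ this))
          simp [beq_iff_eq, hne]
        exact pvInsert_H_not_mem _ ys p hpw hnot hf

lemma pvAfold (refd : PySem.Dict String Int) (rows : List (List (String × String)))
    (k0 : List (Int × List (String × String))) (r0 : Int) :
    rows.foldl
      (fun (s : List (Int × List (String × String)) × Int) row =>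
        let key := pvChanKey refd row
        if key != "" && refd.contains key then (s.1 ++ [(refd.getD key 0, row)], s.2)
        else (s.1, s.2 + 1))
      (k0, r0)
    = (k0 ++ pvKept refd rows, r0 + (rows.countP (fun row => !pvPred refd row) : Int)) := by
  induction rows generalizing k0 r0 with
  | nil => simp [pvKept]
  | cons row rows ih =>
      simp only [List.foldl_cons]
      have hc : (pvChanKey refd row != "" && refd.contains (pvChanKey refd row)) = pvPred refd row := rfl
      rw [hc]
      cases hp : pvPred refd row
      · simp only [Bool.false_eq_true, if_false]
        rw [ih]
        simp [pvKept, hp]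
        ring
      · simp only [if_true]
        rw [ih]
        simp [pvKept, hp, pvOrd, List.append_assoc]

-- removed: counting None in the order list is counting the dropped rows (generic)
lemma pvGenCount {α : Type} (p : α → Bool) (f : α → Int) (rows : List α) :
    PySem.List.count (rows.map (fun x => if p x then some (f x) else none)) none
      = rows.countP (fun r => !p r) := by
  rw [PySem.List.count_eq, List.count_eq_countP, List.countP_map]
  apply List.countP_congr
  intro r _
  cases hp : p r <;> simp [hp]

-- the distinct order values B iterates are the first components of A's kept pairs (generic)
lemma pvGenOrders {α : Type} (p : α → Bool) (f : α → Int) (rows : List α) :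
    (rows.map (fun x => if p x then some (f x) else none)).filterMap id
      = ((rows.filter p).map (fun r => (f r, r))).map Prod.fst := by
  rw [List.filterMap_map]
  induction rows with
  | nil => rfl
  | cons row rows ih =>
      simp only [List.filterMap_cons, Function.comp_apply, List.filter_cons]
      cases hp : p row
      · simpa using ih
      · simpa using ih

-- each group of the kept pairs is the filter of the original rows (generic)
lemma pvGenGroup {α : Type} (p : α → Bool) (f : α → Int) (rows : List α) (o : Int) :
    (((rows.filter p).map (fun r => (f r, r))).filter (fun q => q.1 == o)).map (fun x => x.2)
      = rows.filter (fun r => (if p r then some (f r) else none) == some o) := by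
  induction rows with
  | nil => rfl
  | cons row rows ih =>
      simp only [List.filter_cons]
      cases hp : p row
      · simpa using ih
      · by_cases ho : f row = o
        · simpa [ho] using ih
        · simpa [ho] using ih

-- ===== VERDICT (by name: the statement is the Claim_ definition above) =====
theorem reorder_channels_spec : Claim_equal_reorder_channels := by
  intro rows ref _hdom
  unfold Spec_reorder_channels reorder_channels reorder_channels_alt
  dsimp only
  rw [pvAfold (PySem.Dict.mk ref) rows [] 0]
  dsimp only
  set refd := PySem.Dict.mk ref with hrefd
  have hfun : pvOrderOf refd
      = fun x => if pvPred refd x then some (pvOrd refd x) else none :=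
    funext (pvOrderOf_eq refd)
  rw [hfun]
  rw [pvGenCount (pvPred refd) (pvOrd refd) rows,
    pvGenOrders (pvPred refd) (pvOrd refd) rows]
  have hrows : (PySem.List.sorted (pvKept refd rows) (fun item => item.1) false).map (fun x => x.2)
      = (PySem.List.sorted (PySem.Set.ofList ((pvKept refd rows).map Prod.fst)) (fun o => o) false).flatMap
          (fun o => rows.filter (fun r => (if pvPred refd r then some (pvOrd refd r) else none) == some o)) := by
    rw [pvSort (pvKept refd rows)]
    simp only [pvH, List.map_flatMap]
    exact List.flatMap_congr (fun o _ => pvGenGroup (pvPred refd) (pvOrd refd) rows o)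
  have hK : (rows.filter (pvPred refd)).map (fun r => (pvOrd refd r, r)) = pvKept refd rows := rfl
  rw [pvFirstId_eq]
  simp only [List.nil_append, hK]
  rw [← hrows]
  simp
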